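-- pv_equiv track=rewrite | github.com/shohei-miyoshi/lecture_craft | backend/experiments/scripts/step9_phase1.py | _cond_ids_by_modality
-- ===== SOURCE A (Python) =====
-- from typing import Any, Dict, List, Optional, Tuple, Set
--
-- def classify_modality_from_cond(cond_id: str) -> str:
--     cid = (cond_id or "").lower()
--     if "audio" in cid:
--         return "audio"
--     if "anim" in cid or "animation" in cid or "video" in cid:
--         return "video"
--     return "unknown"
--
-- def _cond_ids_by_modality(cond_order: List[str], modality_map: Dict[str, str]) -> Dict[str, List[str]]:
--     out: Dict[str, List[str]] = {"audio": [], "video": [], "unknown": []}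
--     for cid in cond_order:
--         m = modality_map.get(cid) or classify_modality_from_cond(cid)
--         if m not in out:
--             m = "unknown"
--         out[m].append(cid)
--     return out
-- ===== SOURCE B (Python) =====
-- def classify_modality_from_cond(cond_id: str) -> str:
--     cid = (cond_id or "").lower()
--     if "audio" in cid:
--         return "audio"
--     if "anim" in cid or "animation" in cid or "video" in cid:
--         return "video"
--     return "unknown"
--
-- def _cond_ids_by_modality(cond_order, modality_map):
--     def resolve(cid):
--         m = modality_map.get(cid) or classify_modality_from_cond(cid)
--         return m if m in ("audio", "video", "unknown") else "unknown"
--     return {k: [cid for cid in cond_order if resolve(cid) == k]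
--             for k in ("audio", "video", "unknown")}
-- ===== Notes on version B (the rewrite author's own statement) =====
-- stated objective: alternative
-- what changed: A threads one mutable dict through a single loop, appending each id to its bucket; B instead defines a pure resolve(cid) helper and builds the result as a dict comprehension over the three fixed keys, each bucket a filter of cond_order by resolved modality (key-indexed selection instead of a stateful accumulating loop).
import Mathlib
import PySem

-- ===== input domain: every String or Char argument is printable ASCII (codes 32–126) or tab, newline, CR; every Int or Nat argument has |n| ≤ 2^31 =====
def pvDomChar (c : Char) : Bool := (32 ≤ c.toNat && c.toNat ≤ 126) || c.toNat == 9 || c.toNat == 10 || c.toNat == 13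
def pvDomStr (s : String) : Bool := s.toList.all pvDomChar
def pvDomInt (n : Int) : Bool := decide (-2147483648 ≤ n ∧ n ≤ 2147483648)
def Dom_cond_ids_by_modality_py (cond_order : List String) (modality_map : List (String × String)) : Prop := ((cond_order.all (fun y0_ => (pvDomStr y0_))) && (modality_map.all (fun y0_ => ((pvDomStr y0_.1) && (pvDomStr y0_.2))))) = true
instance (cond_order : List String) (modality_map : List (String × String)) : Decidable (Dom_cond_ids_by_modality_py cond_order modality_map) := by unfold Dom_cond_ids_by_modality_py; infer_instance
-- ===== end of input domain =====

-- B replaces A's single stateful loop over a mutable dict with a pure resolve(cid) helper and a dict comprehension over the three fixed keys, each bucket a filter of cond_order (objective: alternative decomposition, same cost).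


-- ===== PORT A =====
def pvClassify (cond_id : String) : String :=
  let cid := PySem.Str.lower cond_id   -- (cond_id or "").lower(): '' lowers to '', so lowering cond_id directly is exact
  if PySem.Str.isIn "audio" cid then "audio"
  else if PySem.Str.isIn "anim" cid || PySem.Str.isIn "animation" cid || PySem.Str.isIn "video" cid then "video"
  else "unknown"

def cond_ids_by_modality_py (cond_order : List String) (modality_map : List (String × String)) : List (String × List String) :=
  let mm : PySem.Dict String String := PySem.Dict.ofList modality_map
  let out0 : PySem.Dict String (List String) :=
    ((PySem.Dict.empty.insert "audio" []).insert "video" []).insert "unknown" []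
  let out := cond_order.foldl (fun out cid =>
      -- m = modality_map.get(cid) or classify_modality_from_cond(cid)  ('' is falsy)
      let m0 := match mm.get? cid with
        | some s => if s = "" then pvClassify cid else s
        | none => pvClassify cid
      -- if m not in out: m = "unknown"
      let m := if out.contains m0 then m0 else "unknown"
      out.modify m [] (· ++ [cid])) out0
  out.items


-- ===== PORT B =====
def pvResolve (modality_map : List (String × String)) (cid : String) : String :=
  let m := match (PySem.Dict.ofList modality_map).get? cid with
    | some s => if s = "" then pvClassify cid else s
    | none => pvClassify cid
  if m = "audio" || m = "video" || m = "unknown" then m else "unknown"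

def cond_ids_by_modality_py_alt (cond_order : List String) (modality_map : List (String × String)) : List (String × List String) :=
  (["audio", "video", "unknown"].map (fun k =>
    (k, cond_order.filter (fun cid => pvResolve modality_map cid == k))))


-- ===== PRECONDITION & SPEC =====
def Spec_cond_ids_by_modality_py (cond_order : List String) (modality_map : List (String × String)) (out : List (String × List String)) : Prop := out = cond_ids_by_modality_py_alt cond_order modality_map
instance (cond_order : List String) (modality_map : List (String × String)) (out : List (String × List String)) : Decidable (Spec_cond_ids_by_modality_py cond_order modality_map out) := by unfold Spec_cond_ids_by_modality_py; infer_instance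

-- ===== CLAIM (what is proved, stated in full; the proofs are below) =====
def Claim_equal_cond_ids_by_modality_py : Prop := ∀ (cond_order : List String) (modality_map : List (String × String)), Dom_cond_ids_by_modality_py cond_order modality_map → Spec_cond_ids_by_modality_py cond_order modality_map (cond_ids_by_modality_py cond_order modality_map)

-- ===== LEMMAS AND PROOFS =====

-- proof helper: pvResolve with the dict precomputed (pvResolve mmL cid = pvRes (ofList mmL) cid by rfl)
def pvRes (mm : PySem.Dict String String) (cid : String) : String :=
  let m := match mm.get? cid with
    | some s => if s = "" then pvClassify cid else s
    | none => pvClassify cid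
  if m = "audio" || m = "video" || m = "unknown" then m else "unknown"

theorem pvRes_cases (mm : PySem.Dict String String) (cid : String) :
    pvRes mm cid = "audio" ∨ pvRes mm cid = "video" ∨ pvRes mm cid = "unknown" := by
  unfold pvRes
  generalize (match mm.get? cid with
    | some s => if s = "" then pvClassify cid else s
    | none => pvClassify cid) = m
  by_cases h : m = "audio" ∨ m = "video" ∨ m = "unknown"
  · rcases h with h | h | h <;> subst h <;> simp
  · push Not at h
    simp [h.1, h.2.1, h.2.2]

theorem pv_loop (mm : PySem.Dict String String) (l : List String) (a v u : List String) :
    l.foldl (fun out cid =>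
        let m0 := match mm.get? cid with
          | some s => if s = "" then pvClassify cid else s
          | none => pvClassify cid
        let m := if out.contains m0 then m0 else "unknown"
        out.modify m [] (· ++ [cid]))
      (PySem.Dict.mk [("audio", a), ("video", v), ("unknown", u)])
    = PySem.Dict.mk
        [("audio", a ++ l.filter (fun c => pvRes mm c == "audio")),
         ("video", v ++ l.filter (fun c => pvRes mm c == "video")),
         ("unknown", u ++ l.filter (fun c => pvRes mm c == "unknown"))] := by
  induction l generalizing a v u with
  | nil => simp
  | cons cid l ih =>
    have hm : (if (PySem.Dict.mk [("audio", a), ("video", v), ("unknown", u)]).contains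
          (match mm.get? cid with
            | some s => if s = "" then pvClassify cid else s
            | none => pvClassify cid)
        then (match mm.get? cid with
            | some s => if s = "" then pvClassify cid else s
            | none => pvClassify cid)
        else "unknown") = pvRes mm cid := by
      unfold pvRes
      generalize (match mm.get? cid with
        | some s => if s = "" then pvClassify cid else s
        | none => pvClassify cid) = m
      by_cases h : m = "audio" ∨ m = "video" ∨ m = "unknown"
      · rcases h with h | h | h <;> subst h <;> simp [PySem.Dict.contains]
      · push Not at h
        simp [PySem.Dict.contains, h.1, h.2.1, h.2.2, Ne.symm h.1, Ne.symm h.2.1, Ne.symm h.2.2]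
    simp only [List.foldl_cons]
    rw [hm]
    rcases pvRes_cases mm cid with h | h | h <;> rw [h]
    · have hstep : (PySem.Dict.mk [("audio", a), ("video", v), ("unknown", u)]).modify
          "audio" [] (· ++ [cid])
          = PySem.Dict.mk [("audio", a ++ [cid]), ("video", v), ("unknown", u)] := by
        simp [PySem.Dict.modify, PySem.Dict.insert, PySem.Dict.getD, PySem.Dict.get?,
          PySem.Dict.contains]
      rw [hstep, ih]
      simp [h]
    · have hstep : (PySem.Dict.mk [("audio", a), ("video", v), ("unknown", u)]).modify
          "video" [] (· ++ [cid])
          = PySem.Dict.mk [("audio", a), ("video", v ++ [cid]), ("unknown", u)] := by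
        simp [PySem.Dict.modify, PySem.Dict.insert, PySem.Dict.getD, PySem.Dict.get?,
          PySem.Dict.contains]
      rw [hstep, ih]
      simp [h]
    · have hstep : (PySem.Dict.mk [("audio", a), ("video", v), ("unknown", u)]).modify
          "unknown" [] (· ++ [cid])
          = PySem.Dict.mk [("audio", a), ("video", v), ("unknown", u ++ [cid])] := by
        simp [PySem.Dict.modify, PySem.Dict.insert, PySem.Dict.getD, PySem.Dict.get?,
          PySem.Dict.contains]
      rw [hstep, ih]
      simp [h]

-- ===== VERDICT (by name: the statement is the Claim_ definition above) =====
theorem cond_ids_by_modality_py_spec : Claim_equal_cond_ids_by_modality_py := by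
  intro cond_order modality_map _
  unfold Spec_cond_ids_by_modality_py cond_ids_by_modality_py cond_ids_by_modality_py_alt
  have h0 : (((PySem.Dict.empty.insert "audio" ([] : List String)).insert "video" []).insert "unknown" [])
      = PySem.Dict.mk [("audio", []), ("video", []), ("unknown", [])] := by decide
  simp only [h0]
  rw [pv_loop]
  simp [pvResolve, pvRes]
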